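-- pv_equiv track=rewrite | github.com/Fondamenti18/fondamenti-di-programmazione | students/1814440/homework03/program03.py | coloraDx
-- ===== SOURCE A (Python) =====
-- def inside(imm,x,y):
--     return 0<=x<len(imm[0]) and 0<=y<len(imm)
--
-- def coloraDx(imm,x,y,c,c1,c2,area,perimetro,bordi):
--     if inside(imm,x+1,y) and imm[y][x+1]==c:
--         imm[y][x+1]=c1
--         area+=1
--         imm,area,perimetro,bordi=coloraDx(imm,x+1,y,c,c1,c2,area,perimetro,bordi)
--     else:
--         imm[y][x]=c2
--         perimetro+=1
--         bordi.add((x,y))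
--         area-=1
--     return imm,area,perimetro,bordi
-- ===== SOURCE B (Python) =====
-- def coloraDx(imm, x, y, c, c1, c2, area, perimetro, bordi):
--     w = len(imm[0])
--     h = len(imm)
--     while 0 <= x + 1 < w and 0 <= y < h and imm[y][x + 1] == c:
--         imm[y][x + 1] = c1
--         area += 1
--         x += 1
--     imm[y][x] = c2
--     perimetro += 1
--     bordi.add((x, y))
--     return imm, area - 1, perimetro, bordi
-- ===== Notes on version B (the rewrite author's own statement) =====
-- stated objective: idiomatic
-- what changed: The rightward tail recursion is replaced by a while-loop that advances x while the next pixel matches, with the single border/perimeter base-case action performed once after the loop.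
import Mathlib
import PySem

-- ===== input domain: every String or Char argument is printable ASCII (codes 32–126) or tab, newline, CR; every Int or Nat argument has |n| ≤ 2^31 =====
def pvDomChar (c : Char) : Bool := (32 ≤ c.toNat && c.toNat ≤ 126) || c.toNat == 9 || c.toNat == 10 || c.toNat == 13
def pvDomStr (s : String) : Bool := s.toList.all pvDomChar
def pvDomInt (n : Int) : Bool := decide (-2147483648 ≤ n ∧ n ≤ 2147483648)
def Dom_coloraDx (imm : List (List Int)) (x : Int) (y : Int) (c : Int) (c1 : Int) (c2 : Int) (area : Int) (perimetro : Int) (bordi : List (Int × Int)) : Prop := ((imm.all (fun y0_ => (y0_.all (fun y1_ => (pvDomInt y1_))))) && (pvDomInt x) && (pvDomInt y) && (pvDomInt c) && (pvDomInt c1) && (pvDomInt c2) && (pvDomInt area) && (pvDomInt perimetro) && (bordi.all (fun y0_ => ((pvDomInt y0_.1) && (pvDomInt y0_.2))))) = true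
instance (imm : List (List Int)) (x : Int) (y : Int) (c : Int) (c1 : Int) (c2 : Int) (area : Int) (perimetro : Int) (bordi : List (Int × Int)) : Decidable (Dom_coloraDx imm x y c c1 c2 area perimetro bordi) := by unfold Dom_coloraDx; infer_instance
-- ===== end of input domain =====

-- B replaces A's rightward tail recursion by a while-loop (same mutations of imm and bordi; the
-- equivalence proved here is about the returned tuple). Both A and B mutate imm and bordi in place
-- in Python; B performs the identical mutations.

-- Used by the ports' termination proofs (cited in decreasing_by): writing pixel (y, i) of imm
-- does not change the length of row 0.
theorem pvRow0LenSet (imm : List (List Int)) (y i v : Int) (hy0 : 0 ≤ y) (hy1 : y < (imm.length : Int)) :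
    (PySem.List.pyGetD (PySem.List.pySetD imm y (PySem.List.pySetD (PySem.List.pyGetD imm y []) i v)) 0 []).length
      = (PySem.List.pyGetD imm 0 []).length := by
  rw [PySem.List.pySetD_of_nonneg imm _ hy0, PySem.List.pyGetD_zero, PySem.List.pyGetD_zero]
  have hlt : y.toNat < imm.length := by omega
  have hr : (PySem.List.pySetD (PySem.List.pyGetD imm y []) i v).length
      = (PySem.List.pyGetD imm y []).length := PySem.List.length_pySetD _ _ _
  have hget : PySem.List.pyGetD imm y [] = imm[y.toNat] :=
    PySem.List.pyGetD_eq_getElem imm [] hy0 hy1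
  rcases Nat.eq_zero_or_pos y.toNat with h0 | hpos
  · -- row 0 itself is replaced; the replacement has the same length
    rcases imm with _ | ⟨r, rest⟩
    · simp at hlt
    · simp [List.getD, h0, hget, PySem.List.length_pySetD]
  · -- a later row is replaced; row 0 is untouched
    rcases imm with _ | ⟨r, rest⟩
    · simp at hlt
    · have : y.toNat ≠ 0 := by omega
      rcases Nat.exists_eq_succ_of_ne_zero this with ⟨k, hk⟩
      simp [hk, List.getD]

-- ===== PORT A =====
-- helper 'inside' of A (total: under Pre_ every index it reads is in range; the chained
-- comparison 0<=x<len(imm[0]) is evaluated with pyGetD's default [] when imm is empty,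
-- which is exact on Pre_ where imm ≠ [])
def pvInside (imm : List (List Int)) (x : Int) (y : Int) : Bool :=
  decide (0 ≤ x) && decide (x < ((PySem.List.pyGetD imm 0 []).length : Int))
    && decide (0 ≤ y) && decide (y < (imm.length : Int))

-- literal transliteration of A: tail recursion; pyGetD/pySetD are exact in-range element
-- read/write (all accesses are in range under Pre_)
def coloraDx (imm : List (List Int)) (x : Int) (y : Int) (c : Int) (c1 : Int) (c2 : Int) (area : Int) (perimetro : Int) (bordi : List (Int × Int)) : List (List Int) × Int × Int × (List (Int × Int)) :=
  if h : (pvInside imm (x+1) y && (PySem.List.pyGetD (PySem.List.pyGetD imm y []) (x+1) 0 == c)) = true then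
    coloraDx (PySem.List.pySetD imm y (PySem.List.pySetD (PySem.List.pyGetD imm y []) (x+1) c1))
      (x+1) y c c1 c2 (area+1) perimetro bordi
  else
    (PySem.List.pySetD imm y (PySem.List.pySetD (PySem.List.pyGetD imm y []) x c2),
      area - 1, perimetro + 1, PySem.Set.add bordi (x, y))
termination_by (((PySem.List.pyGetD imm 0 []).length : Int) + 1 - x).toNat
decreasing_by
  simp only [pvInside, Bool.and_eq_true, decide_eq_true_eq] at h
  rw [pvRow0LenSet imm y (x+1) c1 h.1.1.2 h.1.2]
  omega

-- ===== PORT B =====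
-- the while-loop of B: advances x while the pixel to the right matches c, coloring it c1;
-- returns the image, the final x and the accumulated area
def coloraDxLoop (imm : List (List Int)) (x : Int) (y : Int) (c : Int) (c1 : Int) (area : Int) (w : Nat) (h : Nat) : List (List Int) × Int × Int :=
  if 0 ≤ x + 1 ∧ x + 1 < (w : Int) ∧ 0 ≤ y ∧ y < (h : Int)
      ∧ PySem.List.pyGetD (PySem.List.pyGetD imm y []) (x+1) 0 = c then
    coloraDxLoop (PySem.List.pySetD imm y (PySem.List.pySetD (PySem.List.pyGetD imm y []) (x+1) c1))
      (x+1) y c c1 (area+1) w h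
  else (imm, x, area)
termination_by ((w : Int) + 1 - x).toNat
decreasing_by omega

-- literal transliteration of B (Source B): compute w and h once, run the loop, then do the
-- base-case action once at the final x
def coloraDx_alt (imm : List (List Int)) (x : Int) (y : Int) (c : Int) (c1 : Int) (c2 : Int) (area : Int) (perimetro : Int) (bordi : List (Int × Int)) : List (List Int) × Int × Int × (List (Int × Int)) :=
  let w := (PySem.List.pyGetD imm 0 []).length
  let r := coloraDxLoop imm x y c c1 area w imm.length
  (PySem.List.pySetD r.1 y (PySem.List.pySetD (PySem.List.pyGetD r.1 y []) r.2.1 c2),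
    r.2.2 - 1, perimetro + 1, PySem.Set.add bordi (r.2.1, y))

-- ===== PRECONDITION & SPEC =====
-- Pre_ is the set of inputs on which A provably returns: a nonempty image, y a valid (possibly
-- negative, Python-wraparound) row index, x a valid (possibly negative) index into row y, and —
-- when y ≥ 0, so that the rightward walk can run — row y at least as long as row 0 (whose length
-- is the walk's bound). Outside Pre_ A raises IndexError, except on ragged images where row y is
-- shorter than row 0 but the walk happens to stop before leaving row y: there A's survival is an
-- accident of the walked path, not expressible as a condition on the input (see the cited example).
def Pre_coloraDx (imm : List (List Int)) (x : Int) (y : Int) (c : Int) (c1 : Int) (c2 : Int) (area : Int) (perimetro : Int) (bordi : List (Int × Int)) : Prop :=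
  imm ≠ [] ∧ -(imm.length : Int) ≤ y ∧ y < (imm.length : Int)
    ∧ (0 ≤ y → ((imm.headD []).length : Int) ≤ ((PySem.List.pyGetD imm y []).length : Int))
    ∧ -((PySem.List.pyGetD imm y []).length : Int) ≤ x ∧ x < ((PySem.List.pyGetD imm y []).length : Int)
instance (imm : List (List Int)) (x : Int) (y : Int) (c : Int) (c1 : Int) (c2 : Int) (area : Int) (perimetro : Int) (bordi : List (Int × Int)) : Decidable (Pre_coloraDx imm x y c c1 c2 area perimetro bordi) := by unfold Pre_coloraDx; infer_instance

def pvWitness_coloraDx : List (List Int) × Int × Int × Int × Int × Int × Int × Int × (List (Int × Int)) :=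
  ([[5, 5, 5], [1, 2, 3]], 0, 0, 5, 7, 9, 10, 20, [(9, 9)])

def Spec_coloraDx (imm : List (List Int)) (x : Int) (y : Int) (c : Int) (c1 : Int) (c2 : Int) (area : Int) (perimetro : Int) (bordi : List (Int × Int)) (out : List (List Int) × Int × Int × (List (Int × Int))) : Prop := out = coloraDx_alt imm x y c c1 c2 area perimetro bordi
instance (imm : List (List Int)) (x : Int) (y : Int) (c : Int) (c1 : Int) (c2 : Int) (area : Int) (perimetro : Int) (bordi : List (Int × Int)) (out : List (List Int) × Int × Int × (List (Int × Int))) : Decidable (Spec_coloraDx imm x y c c1 c2 area perimetro bordi out) := by unfold Spec_coloraDx; infer_instance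

-- ===== CLAIM (what is proved, stated in full; the proofs are below) =====
def Claim_equal_coloraDx : Prop := ∀ (imm : List (List Int)) (x : Int) (y : Int) (c : Int) (c1 : Int) (c2 : Int) (area : Int) (perimetro : Int) (bordi : List (Int × Int)), Dom_coloraDx imm x y c c1 c2 area perimetro bordi → Pre_coloraDx imm x y c c1 c2 area perimetro bordi → Spec_coloraDx imm x y c c1 c2 area perimetro bordi (coloraDx imm x y c c1 c2 area perimetro bordi)

-- ===== LEMMAS AND PROOFS =====

theorem pvWitness_ok :
    Dom_coloraDx pvWitness_coloraDx.1 pvWitness_coloraDx.2.1 pvWitness_coloraDx.2.2.1 pvWitness_coloraDx.2.2.2.1 pvWitness_coloraDx.2.2.2.2.1 pvWitness_coloraDx.2.2.2.2.2.1 pvWitness_coloraDx.2.2.2.2.2.2.1 pvWitness_coloraDx.2.2.2.2.2.2.2.1 pvWitness_coloraDx.2.2.2.2.2.2.2.2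
    ∧ Pre_coloraDx pvWitness_coloraDx.1 pvWitness_coloraDx.2.1 pvWitness_coloraDx.2.2.1 pvWitness_coloraDx.2.2.2.1 pvWitness_coloraDx.2.2.2.2.1 pvWitness_coloraDx.2.2.2.2.2.1 pvWitness_coloraDx.2.2.2.2.2.2.1 pvWitness_coloraDx.2.2.2.2.2.2.2.1 pvWitness_coloraDx.2.2.2.2.2.2.2.2 := by
  decide

-- the two guards are the same condition (same order of tests)
theorem pvGuard_iff (imm : List (List Int)) (x y c : Int) :
    (pvInside imm (x+1) y && (PySem.List.pyGetD (PySem.List.pyGetD imm y []) (x+1) 0 == c)) = true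
      ↔ (0 ≤ x + 1 ∧ x + 1 < ((PySem.List.pyGetD imm 0 []).length : Int) ∧ 0 ≤ y ∧ y < (imm.length : Int)
          ∧ PySem.List.pyGetD (PySem.List.pyGetD imm y []) (x+1) 0 = c) := by
  simp [pvInside, and_assoc]

-- main induction: A's recursion equals B's loop followed by the one base-case action,
-- by strong induction on the distance from x to the right edge
theorem pvMain (n : Nat) : ∀ (imm : List (List Int)) (x y c c1 c2 area perimetro : Int) (bordi : List (Int × Int)),
    (((PySem.List.pyGetD imm 0 []).length : Int) + 1 - x).toNat = n →
    coloraDx imm x y c c1 c2 area perimetro bordi = coloraDx_alt imm x y c c1 c2 area perimetro bordi := by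
  induction n using Nat.strong_induction_on with
  | _ n ih =>
    intro imm x y c c1 c2 area perimetro bordi hn
    rw [coloraDx]
    by_cases hg : (pvInside imm (x+1) y && (PySem.List.pyGetD (PySem.List.pyGetD imm y []) (x+1) 0 == c)) = true
    · -- both take a step
      rw [dif_pos hg]
      obtain ⟨h1, h2, h3, h4, h5⟩ := (pvGuard_iff imm x y c).mp hg
      have hrow := pvRow0LenSet imm y (x+1) c1 h3 h4
      have hlen : (PySem.List.pySetD imm y (PySem.List.pySetD (PySem.List.pyGetD imm y []) (x+1) c1)).length = imm.length :=
        PySem.List.length_pySetD _ _ _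
      have hloop : coloraDxLoop imm x y c c1 area (PySem.List.pyGetD imm 0 []).length imm.length
          = coloraDxLoop (PySem.List.pySetD imm y (PySem.List.pySetD (PySem.List.pyGetD imm y []) (x+1) c1))
              (x+1) y c c1 (area+1) (PySem.List.pyGetD imm 0 []).length imm.length := by
        rw [coloraDxLoop, if_pos ⟨h1, h2, h3, h4, h5⟩]
      have key : coloraDx_alt imm x y c c1 c2 area perimetro bordi
          = coloraDx_alt (PySem.List.pySetD imm y (PySem.List.pySetD (PySem.List.pyGetD imm y []) (x+1) c1))
              (x+1) y c c1 c2 (area+1) perimetro bordi := by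
        unfold coloraDx_alt
        simp only [hrow, hlen, hloop]
      rw [ih ((((PySem.List.pyGetD (PySem.List.pySetD imm y (PySem.List.pySetD (PySem.List.pyGetD imm y []) (x+1) c1)) 0 []).length : Int) + 1 - (x+1)).toNat)
            (by rw [hrow]; omega) _ _ _ _ _ _ _ _ _ rfl]
      exact key.symm
    · -- both stop: the loop exits at once and B performs the base-case action
      rw [dif_neg hg]
      have hloop : coloraDxLoop imm x y c c1 area (PySem.List.pyGetD imm 0 []).length imm.length = (imm, x, area) := by
        rw [coloraDxLoop, if_neg (fun hc => hg ((pvGuard_iff imm x y c).mpr hc))]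
      unfold coloraDx_alt
      simp only [hloop]

-- ===== VERDICT (by name: the statement is the Claim_ definition above) =====
theorem coloraDx_spec : Claim_equal_coloraDx := by
  intro imm x y c c1 c2 area perimetro bordi _ _
  exact pvMain _ imm x y c c1 c2 area perimetro bordi rfl
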